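-- pv_equiv track=rewrite | github.com/shuaking/ABCard | ui.py | render_pipeline_html
-- ===== SOURCE A (Python) =====
-- ICONS = {"done": "✅", "running": "⏳", "error": "❌", "pending": "⬜"}
--
-- def render_pipeline_html(nodes):
--     """渲染连线式流水线"""
--     parts = []
--     prev_done = False
--     for i, (name, status) in enumerate(nodes):
--         if i > 0:
--             if prev_done and status == "running":
--                 line_cls = "active"
--             elif prev_done:
--                 line_cls = "done"
--             else:
--                 line_cls = ""
--             parts.append(f'<div class="pipeline-line {line_cls}"></div>')
--         parts.append(
--             f'<div class="pipeline-node {status}">'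
--             f'<div class="icon">{ICONS.get(status, "⬜")}</div>'
--             f'<div class="label">{name}</div>'
--             f'</div>'
--         )
--         prev_done = status == "done"
--     return f'<div class="pipeline-wrap">{"".join(parts)}</div>'
-- ===== SOURCE B (Python) =====
-- ICONS = {"done": "✅", "running": "⏳", "error": "❌", "pending": "⬜"}
--
--
-- def render_pipeline_html(nodes):
--     """Render the pipeline by structural recursion: a chain is a node,
--     or a node followed by a connector line and the chain of the rest.
--     No parts list and no index/flag state is kept."""
--     return f'<div class="pipeline-wrap">{_chain(nodes)}</div>'
--
--
-- def _chain(nodes):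
--     if not nodes:
--         return ''
--     (name, status), rest = nodes[0], nodes[1:]
--     html = (f'<div class="pipeline-node {status}">'
--             f'<div class="icon">{ICONS.get(status, "⬜")}</div>'
--             f'<div class="label">{name}</div>'
--             f'</div>')
--     if not rest:
--         return html
--     if status == "done":
--         cls = "active" if rest[0][1] == "running" else "done"
--     else:
--         cls = ""
--     return html + f'<div class="pipeline-line {cls}"></div>' + _chain(rest)
-- ===== Notes on version B (the rewrite author's own statement) =====
-- stated objective: simpler
-- what changed: Replaces A's single indexed loop carrying a parts list and a prev_done flag by a structural recursion on the node list (a chain is a node, or a node followed by a connector line computed from the adjacent statuses and the chain of the rest) that concatenates strings directly with no parts list, index or flag state.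
import Mathlib
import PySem

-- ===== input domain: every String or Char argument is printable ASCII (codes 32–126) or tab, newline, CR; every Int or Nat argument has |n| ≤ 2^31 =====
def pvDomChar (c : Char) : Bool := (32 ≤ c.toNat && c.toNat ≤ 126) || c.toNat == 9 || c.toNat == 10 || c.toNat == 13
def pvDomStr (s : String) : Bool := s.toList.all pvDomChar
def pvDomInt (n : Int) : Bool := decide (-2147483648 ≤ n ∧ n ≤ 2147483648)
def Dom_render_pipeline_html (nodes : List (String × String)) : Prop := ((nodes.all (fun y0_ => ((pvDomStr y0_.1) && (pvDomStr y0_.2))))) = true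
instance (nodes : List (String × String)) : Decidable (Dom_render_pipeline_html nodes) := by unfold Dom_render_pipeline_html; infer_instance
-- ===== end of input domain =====

-- B replaces A's indexed loop with a parts list and a carried prev_done flag by a
-- structural recursion on the node list (a chain is a node, or a node ++ line ++ chain
-- of the rest) that concatenates strings directly: objective 'simpler'.

-- ===== PORT A =====
def pvICONS : PySem.Dict String String :=
  PySem.Dict.ofList [("done", "✅"), ("running", "⏳"), ("error", "❌"), ("pending", "⬜")]

-- the node f-string of A
def pvNodeA (name status : String) : String :=
  "<div class=\"pipeline-node " ++ status ++ "\"><div class=\"icon\">"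
    ++ PySem.Dict.getD pvICONS status "⬜" ++ "</div><div class=\"label\">" ++ name ++ "</div></div>"

def render_pipeline_html (nodes : List (String × String)) : String :=
  let st :=
    (PySem.List.enumerate nodes 0).foldl
      (fun (acc : List String × Bool) p =>
        let i := p.1
        let name := p.2.1
        let status := p.2.2
        let parts :=
          if i > 0 then
            let line_cls :=
              if acc.2 && (status == "running") then "active"
              else if acc.2 then "done" else ""
            acc.1 ++ ["<div class=\"pipeline-line " ++ line_cls ++ "\"></div>"]
          else acc.1
        (parts ++ [pvNodeA name status], status == "done"))
      ([], false)
  "<div class=\"pipeline-wrap\">" ++ PySem.Str.join "" st.1 ++ "</div>"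

-- ===== PORT B =====
-- Source B's _chain: structural recursion on the node list, direct string concatenation
def pvChain : List (String × String) → String
  | [] => ""
  | (name, status) :: rest =>
    let html :=
      "<div class=\"pipeline-node " ++ status ++ "\"><div class=\"icon\">"
        ++ PySem.Dict.getD pvICONS status "⬜" ++ "</div><div class=\"label\">" ++ name ++ "</div></div>"
    match rest with
    | [] => html
    | (_, s2) :: _ =>
      let cls :=
        if status == "done" then (if s2 == "running" then "active" else "done") else ""
      html ++ ("<div class=\"pipeline-line " ++ cls ++ "\"></div>") ++ pvChain rest

def render_pipeline_html_alt (nodes : List (String × String)) : String :=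
  "<div class=\"pipeline-wrap\">" ++ pvChain nodes ++ "</div>"

-- ===== PRECONDITION & SPEC =====
def Spec_render_pipeline_html (nodes : List (String × String)) (out : String) : Prop := out = render_pipeline_html_alt nodes
instance (nodes : List (String × String)) (out : String) : Decidable (Spec_render_pipeline_html nodes out) := by unfold Spec_render_pipeline_html; infer_instance

-- ===== CLAIM (what is proved, stated in full; the proofs are below) =====
def Claim_equal_render_pipeline_html : Prop := ∀ (nodes : List (String × String)), Dom_render_pipeline_html nodes → Spec_render_pipeline_html nodes (render_pipeline_html nodes)

-- ===== LEMMAS AND PROOFS =====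

-- A's line f-string at one step, as a function of the adjacent pair of statuses
def pvLineA (ps cs : String) : String :=
  "<div class=\"pipeline-line " ++
    (if (ps == "done") && (cs == "running") then "active"
     else if (ps == "done") then "done" else "") ++ "\"></div>"

-- A's tail loop (indices ≥ 1, prev_done flag = (prev.2 == "done")) appends, for each
-- remaining element, its line part and its node part
theorem pv_tailA (xs : List (String × String)) :
    ∀ (prev : String × String) (parts : List String) (i : Int), 0 < i →
      ((PySem.List.enumerate xs i).foldl
        (fun (acc : List String × Bool) p =>
          let i := p.1
          let name := p.2.1
          let status := p.2.2
          let parts :=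
            if i > 0 then
              let line_cls :=
                if acc.2 && (status == "running") then "active"
                else if acc.2 then "done" else ""
              acc.1 ++ ["<div class=\"pipeline-line " ++ line_cls ++ "\"></div>"]
            else acc.1
          (parts ++ [pvNodeA name status], status == "done"))
        (parts, prev.2 == "done")).1
      = parts ++ ((prev :: xs).zip xs).flatMap (fun pc => [pvLineA pc.1.2 pc.2.2, pvNodeA pc.2.1 pc.2.2]) := by
  induction xs with
  | nil => intro prev parts i hi; simp [PySem.List.enumerate]
  | cons c t ih =>
    intro prev parts i hi
    rw [PySem.List.enumerate_cons]
    simp only [List.foldl, List.zip_cons_cons, List.flatMap_cons]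
    rw [if_pos hi]
    have hrec := ih c (parts ++ [pvLineA prev.2 c.2, pvNodeA c.1 c.2]) (i + 1) (by omega)
    simp only [pvLineA, List.append_assoc, List.cons_append, List.nil_append] at hrec ⊢
    rw [hrec]

-- ''.join over a cons
theorem pv_join_cons (a : String) (l : List String) :
    PySem.Str.join "" (a :: l) = a ++ PySem.Str.join "" l := by
  cases l with
  | nil => simp [PySem.Str.join, PySem.Chars.join, List.intercalate]
  | cons b t => simp [PySem.Str.join, PySem.Chars.join, List.intercalate]

-- joining A's parts for a nonempty list yields B's recursive chain
theorem pv_join_chain (xs : List (String × String)) :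
    ∀ (prev : String × String),
      PySem.Str.join "" (pvNodeA prev.1 prev.2 ::
        ((prev :: xs).zip xs).flatMap (fun pc => [pvLineA pc.1.2 pc.2.2, pvNodeA pc.2.1 pc.2.2]))
      = pvChain (prev :: xs) := by
  induction xs with
  | nil =>
    intro prev
    simp only [List.zip_nil_right, List.flatMap_nil]
    rw [pv_join_cons]
    simp [pvChain, pvNodeA, PySem.Str.join, PySem.Chars.join, List.intercalate]
  | cons c t ih =>
    intro prev
    simp only [List.zip_cons_cons, List.flatMap_cons, List.cons_append, List.nil_append]
    rw [pv_join_cons, pv_join_cons, ih c]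
    obtain ⟨pn, ps⟩ := prev
    obtain ⟨cn, cs⟩ := c
    simp only [pvChain, pvNodeA, pvLineA]
    by_cases h1 : ps = "done" <;> by_cases h2 : cs = "running" <;>
      simp [h1, h2, ← String.append_assoc]

-- ===== VERDICT (by name: the statement is the Claim_ definition above) =====
theorem render_pipeline_html_spec : Claim_equal_render_pipeline_html := by
  intro nodes _
  unfold Spec_render_pipeline_html render_pipeline_html render_pipeline_html_alt
  cases nodes with
  | nil => simp [PySem.List.enumerate, pvChain, PySem.Str.join, PySem.Chars.join, List.intercalate]
  | cons n0 rest =>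
    rw [PySem.List.enumerate_cons]
    simp only [List.foldl]
    rw [if_neg (show ¬((0:Int) > 0) by omega), show ((0:Int)+1) = 1 by norm_num]
    simp only [List.nil_append]
    rw [pv_tailA rest n0 [pvNodeA n0.1 n0.2] 1 (by omega)]
    simp only [List.cons_append, List.nil_append]
    rw [pv_join_chain rest n0]
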